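-- pv_equiv track=rewrite | github.com/twalen/RankBorderedWords | src/rank_unrank/texts.py | calc_a_b_naive
-- ===== SOURCE A (Python) =====
-- def calc_pi(seq: list[int]) -> list[int]:
--     """Calculates prefix function of a sequence
--     pi[i] = max(l : 0 <= l <= i && seq[:l] == seq[-l-i:i])
--
--     Time complexity: O(n)"""
--     n = len(seq)
--     pi = [0] * n
--     for i, c in enumerate(seq[1:], start=1):
--         j = pi[i - 1]
--         while j > 0 and seq[j] != c:
--             j = pi[j - 1]
--         if seq[j] == c:
--             j += 1
--         pi[i] = j
--     return pi
--
-- def is_bordered(seq: list[int]) -> bool: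
--     """Returns true if a sequence has a border (non empty prefix that is also an suffix)
--
--     Time complexity: O(n)"""
--     if len(seq) > 0:
--         pi = calc_pi(seq)
--         return pi[len(seq) - 1] != 0
--     else:
--         return False
--
-- def calc_a_b_naive(seq: list[int]) -> tuple[list[int], list[int]]:
--     """Naive implementation
--     a[i]=1 iff seq[:i] is unbordered
--     b[i]=1 iff seq has a border of length i
--
--      Time complexity: O(n^2)"""
--     n = len(seq)
--     a = [0] * (n + 1)
--     b = [0] * (n + 1)
--     for i in range(1, n + 1):
--         a[i] = int(not is_bordered(seq[:i]))  # seq[:i] is not bordered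
--     for i in range(1, n):
--         b[i] = int(seq[:i] == seq[-i:])  # has a border of length i
--     return a, b
-- ===== SOURCE B (Python) =====
-- def calc_pi(seq: list[int]) -> list[int]:
--     """Prefix function (same helper as the original module). O(n)."""
--     n = len(seq)
--     pi = [0] * n
--     for i, c in enumerate(seq[1:], start=1):
--         j = pi[i - 1]
--         while j > 0 and seq[j] != c:
--             j = pi[j - 1]
--         if seq[j] == c:
--             j += 1
--         pi[i] = j
--     return pi
--
--
-- def calc_a_b_naive(seq):
--     """Compute the prefix function ONCE: seq[:i] is unbordered iff pi[i-1] == 0,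
--     so a comes from one pass over pi instead of re-running calc_pi per prefix."""
--     n = len(seq)
--     pi = calc_pi(seq)
--     a = [0] + [1 if pi[i] == 0 else 0 for i in range(n)]
--     if n > 0:
--         b = [0] + [1 if seq[:i] == seq[n - i:] else 0 for i in range(1, n)] + [0]
--     else:
--         b = [0]
--     return a, b
-- ===== Notes on version B (the rewrite author's own statement) =====
-- stated objective: faster
-- what changed: B computes the prefix function of seq once and reads a[i] = (pi[i-1]==0) from it, instead of A's recomputation of the whole prefix function for every prefix seq[:i]; the a/b arrays are built as comprehensions instead of preallocate-and-assign loops.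
import Mathlib
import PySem

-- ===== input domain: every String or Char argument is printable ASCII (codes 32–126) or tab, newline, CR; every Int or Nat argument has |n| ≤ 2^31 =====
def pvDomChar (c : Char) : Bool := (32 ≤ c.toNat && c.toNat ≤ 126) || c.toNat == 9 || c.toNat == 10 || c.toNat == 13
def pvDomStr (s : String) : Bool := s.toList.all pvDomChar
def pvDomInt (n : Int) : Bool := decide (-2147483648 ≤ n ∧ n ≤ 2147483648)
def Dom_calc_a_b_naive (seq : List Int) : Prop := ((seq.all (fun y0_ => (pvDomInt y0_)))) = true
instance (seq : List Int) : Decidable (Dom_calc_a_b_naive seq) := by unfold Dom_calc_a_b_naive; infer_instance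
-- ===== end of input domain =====

-- B computes the prefix function once (a[i] = 1 iff pi[i-1] = 0) instead of re-running calc_pi on every prefix; both functions are total.

-- ===== PORT A =====
-- the 'while j > 0 and seq[j] != c: j = pi[j-1]' loop; all indices are in range at runtime (0 ≤ j ≤ i < len),
-- so reads are rendered with getD 0 (exact).  fuel = initial j.toNat suffices: j strictly decreases (pi[t] ≤ t),
-- and when fuel runs out j ≤ 0, where the loop would stop anyway.
def piWhile (s pi : List Int) (c j : Int) (fuel : Nat) : Int :=
  match fuel with
  | 0 => j
  | f + 1 =>
    if j > 0 && !(s.getD j.toNat 0 == c) then piWhile s pi c (pi.getD (j - 1).toNat 0) f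
    else j

-- the value the loop body stores into pi[i]
def piVal (s pi : List Int) (i : Int) : Int :=
  let c := s.getD i.toNat 0
  let j0 := pi.getD (i - 1).toNat 0
  let j1 := piWhile s pi c j0 j0.toNat
  if s.getD j1.toNat 0 == c then j1 + 1 else j1

-- calc_pi: pi = [0]*n; 'for i, c in enumerate(seq[1:], start=1)' rendered as a fold over range(1, n)
-- reading c = seq[i] (exact: enumerate pairs each i with seq[i])
def calcPi (s : List Int) : List Int :=
  (PySem.List.pyRange 1 (PySem.List.len s) 1).foldl
    (fun pi i => PySem.List.pySetD pi i (piVal s pi i)) (List.replicate s.length 0)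

-- is_bordered; pi[len(seq)-1] is always in range, rendered with pyGetD (exact)
def isBordered (s : List Int) : Bool :=
  if PySem.List.len s > 0 then
    !(PySem.List.pyGetD (calcPi s) (PySem.List.len s - 1) 0 == 0)
  else false

def calc_a_b_naive (seq : List Int) : List Int × List Int :=
  let n : Int := PySem.List.len seq
  let a0 : List Int := List.replicate (seq.length + 1) 0
  let b0 : List Int := List.replicate (seq.length + 1) 0
  let a := (PySem.List.pyRange 1 (n + 1) 1).foldl
    (fun a i => PySem.List.pySetD a i
      (if isBordered (PySem.List.slice seq none (some i)) then 0 else 1)) a0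
  let b := (PySem.List.pyRange 1 n 1).foldl
    (fun b i => PySem.List.pySetD b i
      (if PySem.List.slice seq none (some i) == PySem.List.slice seq (some (-i)) none then 1 else 0)) b0
  (a, b)

-- ===== PORT B =====
-- Source B: pi = calc_pi(seq) once; a and b as comprehensions
def calc_a_b_naive_alt (seq : List Int) : List Int × List Int :=
  let n : Int := PySem.List.len seq
  let pi := calcPi seq
  let a := 0 :: (PySem.List.pyRange 0 n 1).map
    (fun i => if PySem.List.pyGetD pi i 0 == 0 then (1 : Int) else 0)
  let b := if n > 0 then
      (0 :: (PySem.List.pyRange 1 n 1).map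
        (fun i => if PySem.List.slice seq none (some i) == PySem.List.slice seq (some (n - i)) none
                  then (1 : Int) else 0)) ++ [0]
    else [0]
  (a, b)

-- ===== PRECONDITION & SPEC =====
def Spec_calc_a_b_naive (seq : List Int) (out : List Int × List Int) : Prop := out = calc_a_b_naive_alt seq
instance (seq : List Int) (out : List Int × List Int) : Decidable (Spec_calc_a_b_naive seq out) := by unfold Spec_calc_a_b_naive; infer_instance

-- ===== CLAIM (what is proved, stated in full; the proofs are below) =====
def Claim_equal_calc_a_b_naive : Prop := ∀ (seq : List Int), Dom_calc_a_b_naive seq → Spec_calc_a_b_naive seq (calc_a_b_naive seq)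

-- ===== LEMMAS AND PROOFS =====

-- append-building version of calc_pi's state after processing i = 1 .. k-1
def appPi (s : List Int) (k : Nat) : List Int :=
  (PySem.List.pyRange 1 (k : Int) 1).foldl (fun pi i => pi ++ [piVal s pi i]) [0]

lemma appPi_one (s : List Int) : appPi s 1 = [0] := by
  simp [appPi, PySem.List.pyRange_one_eq_nil]

lemma appPi_succ (s : List Int) (k : Nat) (hk : 1 ≤ k) :
    appPi s (k + 1) = appPi s k ++ [piVal s (appPi s k) (k : Int)] := by
  unfold appPi
  have h1 : ((k + 1 : Nat) : Int) = (k : Int) + 1 := by push_cast; ring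
  rw [h1, PySem.List.pyRange_one_succ_right (by exact_mod_cast hk)]
  simp [List.foldl_append]

-- the while loop: congruence in s (below index k) and pi (below k), plus 0 ≤ result ≤ j
lemma piWhile_key (s₁ s₂ pi₁ pi₂ : List Int) (c : Int) (k : Nat)
    (hs : ∀ t : Nat, t ≤ k → s₁.getD t 0 = s₂.getD t 0)
    (hag : ∀ t : Nat, t < k → pi₁.getD t 0 = pi₂.getD t 0)
    (hbnd : ∀ t : Nat, t < k → 0 ≤ pi₂.getD t 0 ∧ pi₂.getD t 0 ≤ (t : Int)) :
    ∀ (fuel : Nat) (j : Int), 0 ≤ j → j ≤ (k : Int) →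
      piWhile s₁ pi₁ c j fuel = piWhile s₂ pi₂ c j fuel ∧
      0 ≤ piWhile s₂ pi₂ c j fuel ∧ piWhile s₂ pi₂ c j fuel ≤ j := by
  intro fuel
  induction fuel with
  | zero => intro j h0 _; exact ⟨rfl, h0, le_refl j⟩
  | succ f ih =>
    intro j h0 hk
    have hsj : s₁.getD j.toNat 0 = s₂.getD j.toNat 0 := hs j.toNat (by omega)
    simp only [piWhile, hsj]
    by_cases hc : (decide (j > 0) && !(s₂.getD j.toNat 0 == c)) = true
    · rw [if_pos hc, if_pos hc]
      have hjpos : 0 < j := by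
        have := hc; simp only [Bool.and_eq_true, decide_eq_true_eq] at this; exact this.1
      have ht : (j - 1).toNat < k := by omega
      have hagj : pi₁.getD (j - 1).toNat 0 = pi₂.getD (j - 1).toNat 0 := hag _ ht
      have hb := hbnd _ ht
      have hrec := ih (pi₂.getD (j - 1).toNat 0) hb.1 (by omega)
      rw [hagj]
      refine ⟨hrec.1, hrec.2.1, ?_⟩
      have : pi₂.getD (j - 1).toNat 0 ≤ j - 1 := by
        have := hb.2; omega
      omega
    · rw [if_neg hc, if_neg hc]
      exact ⟨rfl, h0, le_refl j⟩

-- the loop body's value: congruence and 0 ≤ piVal ≤ i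
lemma piVal_key (s₁ s₂ pi₁ pi₂ : List Int) (k : Nat) (hk : 1 ≤ k)
    (hs : ∀ t : Nat, t ≤ k → s₁.getD t 0 = s₂.getD t 0)
    (hag : ∀ t : Nat, t < k → pi₁.getD t 0 = pi₂.getD t 0)
    (hbnd : ∀ t : Nat, t < k → 0 ≤ pi₂.getD t 0 ∧ pi₂.getD t 0 ≤ (t : Int)) :
    piVal s₁ pi₁ (k : Int) = piVal s₂ pi₂ (k : Int) ∧
    0 ≤ piVal s₂ pi₂ (k : Int) ∧ piVal s₂ pi₂ (k : Int) ≤ (k : Int) := by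
  have htn : ((k : Int)).toNat = k := by omega
  have htm : (((k : Int)) - 1).toNat = k - 1 := by omega
  have hkm : k - 1 < k := by omega
  have hc : s₁.getD ((k : Int)).toNat 0 = s₂.getD ((k : Int)).toNat 0 := by
    rw [htn]; exact hs k (le_refl k)
  have hj0 : pi₁.getD (((k : Int)) - 1).toNat 0 = pi₂.getD (((k : Int)) - 1).toNat 0 := by
    rw [htm]; exact hag _ hkm
  have hb := hbnd _ hkm
  have hb2 : pi₂.getD (k - 1) 0 ≤ (k : Int) - 1 := by
    have := hb.2; omega
  have hw := piWhile_key s₁ s₂ pi₁ pi₂ (s₂.getD ((k : Int)).toNat 0) k hs hag hbnd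
      (pi₂.getD (((k : Int)) - 1).toNat 0).toNat (pi₂.getD (((k : Int)) - 1).toNat 0)
      (by rw [htm]; exact hb.1) (by rw [htm]; omega)
  set j1 := piWhile s₂ pi₂ (s₂.getD ((k : Int)).toNat 0) (pi₂.getD (((k : Int)) - 1).toNat 0)
      (pi₂.getD (((k : Int)) - 1).toNat 0).toNat with hj1def
  have hj1b : 0 ≤ j1 ∧ j1 ≤ (k : Int) - 1 := by
    refine ⟨hw.2.1, ?_⟩
    have := hw.2.2; rw [htm] at this; omega
  have hsj1 : s₁.getD j1.toNat 0 = s₂.getD j1.toNat 0 := hs j1.toNat (by omega)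
  simp only [piVal, hc, hj0]
  rw [← hj1def]
  rw [hw.1]
  rw [hsj1]
  refine ⟨rfl, ?_⟩
  split <;> omega

lemma appPi_inv (s : List Int) : ∀ k : Nat, 1 ≤ k →
    (appPi s k).length = k ∧ ∀ t : Nat, t < k → 0 ≤ (appPi s k).getD t 0 ∧ (appPi s k).getD t 0 ≤ (t : Int) := by
  intro k
  induction k with
  | zero => omega
  | succ k ih =>
    intro _
    by_cases hk : 1 ≤ k
    · have ih' := ih hk
      rw [appPi_succ s k hk]
      have hv := piVal_key s s (appPi s k) (appPi s k) k hk
        (fun t _ => rfl) (fun t _ => rfl) ih'.2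
      constructor
      · simp [ih'.1]
      · intro t ht
        by_cases htk : t < k
        · rw [List.getD_append _ _ _ _ (by omega)]
          exact ih'.2 t htk
        · have htk' : t = k := by omega
          have key : (appPi s k ++ [piVal s (appPi s k) (k : Int)]).getD t 0
              = piVal s (appPi s k) (k : Int) := by
            rw [List.getD_append_right _ _ _ _ (by omega), ih'.1, htk']
            simp
          rw [key, htk']
          exact ⟨hv.2.1, hv.2.2⟩
    · have hk0 : k = 0 := by omega
      subst hk0
      rw [appPi_one]
      refine ⟨rfl, ?_⟩
      intro t ht
      have : t = 0 := by omega
      subst this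
      simp

lemma appPi_take (s : List Int) (m : Nat) (hm : m ≤ s.length) :
    ∀ k : Nat, 1 ≤ k → k ≤ m → appPi (s.take m) k = appPi s k := by
  intro k
  induction k with
  | zero => omega
  | succ k ih =>
    intro _ hkm
    by_cases hk : 1 ≤ k
    · rw [appPi_succ _ k hk, appPi_succ s k hk, ih hk (by omega)]
      have hs' : ∀ t : Nat, t ≤ k → (s.take m).getD t 0 = s.getD t 0 := by
        intro t htk
        have h1 : t < (s.take m).length := by simp [List.length_take]; omega
        have h2 : t < s.length := by omega
        rw [List.getD_eq_getElem _ _ h1, List.getD_eq_getElem _ _ h2]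
        exact List.getElem_take
      have hv := piVal_key (s.take m) s (appPi s k) (appPi s k) k hk hs'
        (fun _ _ => rfl) (appPi_inv s k hk).2
      rw [hv.1]
    · have : k = 0 := by omega
      subst this
      rw [appPi_one, appPi_one]

lemma take_appPi (s : List Int) (m : Nat) (hm : 1 ≤ m) :
    ∀ k : Nat, m ≤ k → (appPi s k).take m = appPi s m := by
  intro k hk
  induction k, hk using Nat.le_induction with
  | base => exact List.take_of_length_le (le_of_eq (appPi_inv s m hm).1)
  | succ k hmk ih =>
    rw [appPi_succ s k (by omega),
      List.take_append_of_le_length (by rw [(appPi_inv s k (by omega)).1]; exact hmk), ih]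

lemma calcPi_eq_appPi (s : List Int) (hs : s ≠ []) : calcPi s = appPi s s.length := by
  have hn : 1 ≤ s.length := List.length_pos_iff.mpr hs
  have main : ∀ k : Nat, 1 ≤ k → k ≤ s.length →
      (PySem.List.pyRange 1 (k : Int) 1).foldl
          (fun pi i => PySem.List.pySetD pi i (piVal s pi i)) (List.replicate s.length 0)
        = appPi s k ++ List.replicate (s.length - k) 0 := by
    intro k
    induction k with
    | zero => omega
    | succ k ih =>
      intro _ hkn
      by_cases hk : 1 ≤ k
      · rw [show ((k + 1 : Nat) : Int) = (k : Int) + 1 by push_cast; ring,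
          PySem.List.pyRange_one_succ_right (by exact_mod_cast hk)]
        rw [List.foldl_append]
        simp only [List.foldl_cons, List.foldl_nil]
        rw [ih hk (by omega)]
        have hinv := appPi_inv s k hk
        have hv := piVal_key s s (appPi s k ++ List.replicate (s.length - k) 0) (appPi s k) k hk
          (fun _ _ => rfl)
          (fun t ht => List.getD_append _ _ _ _ (by rw [hinv.1]; exact ht)) hinv.2
        rw [hv.1, PySem.List.pySetD_natCast,
          List.set_append_right _ _ (by rw [hinv.1]), hinv.1, Nat.sub_self]
        have h2 : List.replicate (s.length - k) (0 : Int)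
            = 0 :: List.replicate (s.length - (k + 1)) 0 := by
          rw [← List.replicate_succ]; congr 1; omega
        rw [h2, List.set_cons_zero, appPi_succ s k hk, List.append_assoc, List.singleton_append]
      · have : k = 0 := by omega
        subst this
        rw [show ((0 + 1 : Nat) : Int) = 1 by norm_num, PySem.List.pyRange_one_eq_nil (by omega),
          appPi_one]
        simp only [List.foldl_nil, List.singleton_append]
        rw [show (0 : Int) :: List.replicate (s.length - (0 + 1)) 0
            = List.replicate ((s.length - 1) + 1) (0 : Int) by rw [List.replicate_succ]]
        congr 1
        omega
  unfold calcPi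
  rw [PySem.List.len_eq, main s.length hn (le_refl _)]
  simp

-- set-style fold with a state-independent value: fills positions 1..k-1
lemma foldl_pySetD_range (f : Int → Int) (n : Nat) :
    ∀ k : Nat, 1 ≤ k → k ≤ n + 1 →
    (PySem.List.pyRange 1 (k : Int) 1).foldl
        (fun arr i => PySem.List.pySetD arr i (f i)) (List.replicate (n + 1) (0 : Int))
      = 0 :: (PySem.List.pyRange 1 (k : Int) 1).map f ++ List.replicate (n + 1 - k) (0 : Int) := by
  intro k
  induction k with
  | zero => omega
  | succ k ih =>
    intro _ hkn
    by_cases hk : 1 ≤ k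
    · rw [show ((k + 1 : Nat) : Int) = (k : Int) + 1 by push_cast; ring,
        PySem.List.pyRange_one_succ_right (by exact_mod_cast hk)]
      rw [List.foldl_append, List.map_append]
      simp only [List.foldl_cons, List.foldl_nil, List.map_cons, List.map_nil]
      rw [ih hk (by omega), PySem.List.pySetD_natCast, ← List.cons_append]
      have hlen : ((0 : Int) :: (PySem.List.pyRange 1 (k : Int) 1).map f).length = k := by
        simp [PySem.List.length_pyRange_one]
        omega
      rw [List.set_append_right _ _ (by rw [hlen]), hlen, Nat.sub_self]
      have h2 : List.replicate (n + 1 - k) (0 : Int)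
          = 0 :: List.replicate (n + 1 - (k + 1)) 0 := by
        rw [← List.replicate_succ]; congr 1; omega
      rw [h2, List.set_cons_zero]
      simp [List.append_assoc]
    · have : k = 0 := by omega
      subst this
      rw [show ((0 + 1 : Nat) : Int) = 1 by norm_num, PySem.List.pyRange_one_eq_nil (by omega)]
      simp only [List.foldl_nil, List.map_nil, List.singleton_append]
      rw [show (0 : Int) :: List.replicate (n + 1 - (0 + 1)) 0
          = List.replicate ((n + 1 - 1) + 1) (0 : Int) by rw [List.replicate_succ]]
      congr 1

-- pointwise a-entry: is_bordered(seq[:k+1]) reads exactly pi[k] of the full sequence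
lemma a_point (seq : List Int) (k : Nat) (hkn : k < seq.length) :
    (if isBordered (seq.take (k + 1)) then (0 : Int) else 1)
    = (if PySem.List.pyGetD (calcPi seq) ((k : Nat) : Int) 0 == 0 then (1 : Int) else 0) := by
  have hlen : (seq.take (k + 1)).length = k + 1 := by simp [List.length_take]; omega
  have hne : seq.take (k + 1) ≠ [] := by
    apply List.ne_nil_of_length_pos; omega
  have e1 : calcPi (seq.take (k + 1)) = appPi seq (k + 1) := by
    rw [calcPi_eq_appPi _ hne, hlen, appPi_take seq (k + 1) (by omega) (k + 1) (by omega) (le_refl _)]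
  have e2 : calcPi seq = appPi seq seq.length := by
    apply calcPi_eq_appPi
    intro h
    rw [h] at hkn
    simp at hkn
  have lk1 : (appPi seq (k + 1)).length = k + 1 := (appPi_inv seq (k + 1) (by omega)).1
  have lnn : (appPi seq seq.length).length = seq.length := (appPi_inv seq seq.length (by omega)).1
  have hx : (appPi seq seq.length).getD k 0 = (appPi seq (k + 1)).getD k 0 := by
    rw [List.getD_eq_getElem?_getD, List.getD_eq_getElem?_getD]
    congr 1
    rw [← take_appPi seq (k + 1) (by omega) seq.length (by omega),
      List.getElem?_take_of_lt (by omega)]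
  simp only [isBordered, PySem.List.len_eq, hlen, e1, e2]
  rw [if_pos (show ((k + 1 : Nat) : Int) > 0 by exact_mod_cast Nat.succ_pos k)]
  rw [show ((k + 1 : Nat) : Int) - 1 = ((k : Nat) : Int) by push_cast; ring]
  rw [PySem.List.pyGetD_natCast, PySem.List.pyGetD_natCast, hx]
  simp

-- the a-loop: A's per-prefix is_bordered test equals B's single read of pi[i-1]
lemma a_part (seq : List Int) :
    (PySem.List.pyRange 1 ((seq.length : Int) + 1) 1).foldl
      (fun a i => PySem.List.pySetD a i
        (if isBordered (PySem.List.slice seq none (some i)) then 0 else 1))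
      (List.replicate (seq.length + 1) 0)
    = 0 :: (PySem.List.pyRange 0 (seq.length : Int) 1).map
        (fun i => if PySem.List.pyGetD (calcPi seq) i 0 == 0 then (1 : Int) else 0) := by
  have h1 : ((seq.length : Int) + 1) = ((seq.length + 1 : Nat) : Int) := by push_cast; ring
  rw [h1, foldl_pySetD_range _ seq.length (seq.length + 1) (by omega) (le_refl _)]
  simp only [Nat.sub_self, List.replicate_zero, List.append_nil]
  congr 1
  rw [PySem.List.pyRange_one 1, PySem.List.pyRange_one 0]
  rw [show (((seq.length + 1 : Nat) : Int) - 1).toNat = seq.length by omega,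
    show (((seq.length : Nat) : Int) - 0).toNat = seq.length by omega,
    List.map_map, List.map_map]
  apply List.map_congr_left
  intro k hk
  have hkn : k < seq.length := List.mem_range.mp hk
  simp only [Function.comp_apply]
  rw [show (1 : Int) + (k : Int) = ((k + 1 : Nat) : Int) by push_cast; ring,
    PySem.List.slice_to_natCast,
    show (0 : Int) + (k : Int) = ((k : Nat) : Int) by ring]
  exact a_point seq k hkn

-- the b-loop: identical comparisons; seq[-i:] = seq[n-i:] for 1 ≤ i ≤ n-1
lemma b_part (seq : List Int) :
    (PySem.List.pyRange 1 (seq.length : Int) 1).foldl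
      (fun b i => PySem.List.pySetD b i
        (if PySem.List.slice seq none (some i) == PySem.List.slice seq (some (-i)) none then 1 else 0))
      (List.replicate (seq.length + 1) 0)
    = (if (seq.length : Int) > 0 then
        (0 :: (PySem.List.pyRange 1 (seq.length : Int) 1).map
          (fun i => if PySem.List.slice seq none (some i)
                        == PySem.List.slice seq (some ((seq.length : Int) - i)) none
                    then (1 : Int) else 0)) ++ [0]
      else [0]) := by
  by_cases h0 : seq.length = 0
  · rw [h0]
    rw [show ((0 : Nat) : Int) = 0 from rfl, PySem.List.pyRange_one_eq_nil (by omega)]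
    simp
  · rw [if_pos (by exact_mod_cast Nat.pos_of_ne_zero h0)]
    rw [foldl_pySetD_range _ seq.length seq.length (by omega) (by omega)]
    rw [show seq.length + 1 - seq.length = 1 by omega]
    rw [List.cons_append]
    congr 1
    rw [show (List.replicate 1 (0 : Int)) = [0] from rfl]
    congr 1
    apply List.map_congr_left
    intro i hi
    have hmem := (PySem.List.mem_pyRange_one).mp hi
    have hj : i = ((i.toNat : Nat) : Int) := by omega
    have h1 : 0 < i.toNat := by omega
    have h2 : i.toNat ≤ seq.length := by omega
    rw [hj, PySem.List.slice_from_neg_natCast seq i.toNat h1,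
      show ((seq.length : Nat) : Int) - ((i.toNat : Nat) : Int)
        = ((seq.length - i.toNat : Nat) : Int) by omega,
      PySem.List.slice_from_natCast]

-- ===== VERDICT (by name: the statement is the Claim_ definition above) =====
theorem calc_a_b_naive_spec : Claim_equal_calc_a_b_naive := by
  intro seq _
  unfold Spec_calc_a_b_naive calc_a_b_naive calc_a_b_naive_alt
  simp only [PySem.List.len_eq]
  exact Prod.ext (a_part seq) (b_part seq)
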